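-- pv_equiv track=rewrite | github.com/Chukwudebelu/HackerRank | Mathematics/Algebra/Tell_the_Average/TellTheAverage6.py | value_of_S_recursive3
-- ===== SOURCE A (Python) =====
-- def value_of_S_recursive3(L: list) -> int:
--     if (L.__len__() == 0):
--         return list()
--     elif (L.__len__() == 1):  # unary list: L = [a]
--         return L[0]
--     else:           # other lists: L = [a, b, ...]
--         a = L[0]; b = L[1];
--         L = L[:1] + L[2:]    # leave out L[1] using list slicing
--         L[0] = (a + b + a*b) % (1_000_000_000 + 7)
--         return value_of_S_recursive3(L)
-- ===== SOURCE B (Python) =====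
-- def value_of_S_recursive3(L: list) -> int:
--     # S(a, b) = a + b + a*b = (1+a)(1+b) - 1, so the whole fold is
--     # (prod of (1+x) over L) - 1, taken mod 1_000_000_007, in one linear pass.
--     if len(L) == 1:
--         return L[0]
--     M = 1_000_000_007
--     p = 1
--     for x in L:
--         p = p * (x + 1) % M
--     return (p - 1) % M
-- ===== Notes on version B (the rewrite author's own statement) =====
-- stated objective: faster
-- what changed: Uses the identity a+b+a*b = (1+a)(1+b)-1 to compute the answer as the modular product of (1+x) over the list minus 1 in one linear pass, instead of recursion that rebuilds the list by slicing and concatenation at every step.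
-- outside the precondition, e.g. on value_of_S_recursive3([]): A returns [], B returns 0
import Mathlib
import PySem

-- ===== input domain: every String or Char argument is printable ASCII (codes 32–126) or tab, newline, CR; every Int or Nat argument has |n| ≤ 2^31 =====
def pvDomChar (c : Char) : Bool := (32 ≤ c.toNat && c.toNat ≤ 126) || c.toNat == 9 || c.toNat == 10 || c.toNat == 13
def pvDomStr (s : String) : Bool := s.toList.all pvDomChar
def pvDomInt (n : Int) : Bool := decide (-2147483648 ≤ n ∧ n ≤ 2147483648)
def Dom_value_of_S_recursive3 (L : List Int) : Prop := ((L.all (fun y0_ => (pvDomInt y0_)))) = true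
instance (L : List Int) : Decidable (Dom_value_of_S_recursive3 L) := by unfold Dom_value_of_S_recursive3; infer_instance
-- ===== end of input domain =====

-- B replaces A's quadratic slice-and-recurse with one linear modular product of (1+x), using a+b+a*b = (1+a)(1+b)-1 (objective: faster).
-- ===== PORT A =====
-- A faithful on non-empty lists; on [] Python A returns list() (not an int) — excluded by Pre_ below, the 0 here is a placeholder.
def value_of_S_recursive3 (L : List Int) : Int :=
  match L with
  | [] => 0
  | [a] => a
  | a :: b :: rest =>
      -- L[:1] + L[2:] = [a] ++ rest; L[0] = (a+b+a*b) % (10^9+7); recurse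
      value_of_S_recursive3 ((PySem.Int.mod (a + b + a * b) (1000000000 + 7)) :: rest)
termination_by L.length

-- ===== PORT B =====
def value_of_S_recursive3_alt (L : List Int) : Int :=
  match L with
  | [a] => a
  | _ =>
      (L.foldl (fun p x => PySem.Int.mod (p * (x + 1)) 1000000007) 1 - 1).emod 1000000007
      -- '(p - 1) % M' ported with .emod: PySem.Int.mod b M = b % M for this positive M (mod_eq_emod_of_pos)

-- ===== PRECONDITION & SPEC =====
-- Pre_ excludes the empty list: there Python A returns list() (not an int).
def Pre_value_of_S_recursive3 (L : List Int) : Prop := L ≠ []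
instance (L : List Int) : Decidable (Pre_value_of_S_recursive3 L) := by unfold Pre_value_of_S_recursive3; infer_instance
def pvWitness_value_of_S_recursive3 : List Int := [1, 2]
def Spec_value_of_S_recursive3 (L : List Int) (out : Int) : Prop := out = value_of_S_recursive3_alt L
instance (L : List Int) (out : Int) : Decidable (Spec_value_of_S_recursive3 L out) := by unfold Spec_value_of_S_recursive3; infer_instance

-- ===== CLAIM (what is proved, stated in full; the proofs are below) =====
def Claim_equal_value_of_S_recursive3 : Prop := ∀ (L : List Int), Dom_value_of_S_recursive3 L → Pre_value_of_S_recursive3 L → Spec_value_of_S_recursive3 L (value_of_S_recursive3 L)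

-- ===== LEMMAS AND PROOFS =====

-- The modular product loop of B, congruent to the plain product of (1+x).
theorem foldl_prod_emod (xs : List Int) (p : Int) :
    (xs.foldl (fun p x => PySem.Int.mod (p * (x + 1)) 1000000007) p) % 1000000007
      = (p * ((xs.map (fun x => x + 1)).prod)) % 1000000007 := by
  induction xs generalizing p with
  | nil => simp
  | cons b t ih =>
      simp only [List.foldl, List.map, List.prod_cons]
      rw [ih, PySem.Int.mod_eq_emod_of_pos (show (0:Int) < 1000000007 by norm_num), Int.mul_emod,
        Int.emod_emod_of_dvd _ dvd_rfl, ← Int.mul_emod, mul_assoc]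

-- A's recursion computes ((1+a)·∏(1+x) over the rest − 1) % M whenever the rest is nonempty.
theorem valA_closed (xs : List Int) (a : Int) (h : xs ≠ []) :
    value_of_S_recursive3 (a :: xs)
      = ((a + 1) * ((xs.map (fun x => x + 1)).prod) - 1) % 1000000007 := by
  induction xs generalizing a with
  | nil => exact absurd rfl h
  | cons b t ih =>
      rw [show value_of_S_recursive3 (a :: b :: t) =
            value_of_S_recursive3 ((PySem.Int.mod (a + b + a * b) (1000000000 + 7)) :: t) by
          simp only [value_of_S_recursive3]]
      rw [show (1000000000 + 7 : Int) = 1000000007 by norm_num]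
      cases t with
      | nil =>
          simp only [value_of_S_recursive3, List.map, List.prod_cons, List.prod_nil]
          rw [PySem.Int.mod_eq_emod_of_pos (show (0:Int) < 1000000007 by norm_num)]
          congr 1; ring
      | cons c u =>
          rw [ih _ (by simp)]
          rw [PySem.Int.mod_eq_emod_of_pos (show (0:Int) < 1000000007 by norm_num)]
          rw [Int.sub_emod, Int.mul_emod, Int.add_emod, Int.emod_emod_of_dvd _ dvd_rfl,
            ← Int.add_emod, ← Int.mul_emod, ← Int.sub_emod]
          have : a + b + a * b + 1 = (a + 1) * (b + 1) := by ring
          rw [this, mul_assoc]; simp only [List.map_cons, List.prod_cons]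

-- ===== VERDICT (by name: the statement is the Claim_ definition above) =====
theorem value_of_S_recursive3_spec : Claim_equal_value_of_S_recursive3 := by
  intro L _ hpre
  unfold Spec_value_of_S_recursive3
  match L with
  | [] => exact absurd rfl hpre
  | [a] => simp [value_of_S_recursive3, value_of_S_recursive3_alt]
  | a :: b :: rest =>
      rw [valA_closed _ _ (by simp)]
      symm
      show ((a :: b :: rest).foldl (fun p x => PySem.Int.mod (p * (x + 1)) 1000000007) 1 - 1) % 1000000007 = _
      rw [Int.sub_emod, foldl_prod_emod, ← Int.sub_emod]
      simp only [List.map, List.prod_cons, one_mul]
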